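-- pv_equiv track=rewrite | github.com/rhizome-lab/moss | src/moss/tui.py | _get_lexer_for_path
-- ===== SOURCE A (Python) =====
-- def _get_lexer_for_path(path: str) -> str | None:
--     """Get pygments lexer name for a file path."""
--     suffix_map = {
--         ".py": "python",
--         ".rs": "rust",
--         ".js": "javascript",
--         ".ts": "typescript",
--         ".go": "go",
--         ".rb": "ruby",
--         ".java": "java",
--         ".c": "c",
--         ".cpp": "cpp",
--         ".h": "c",
--         ".hpp": "cpp",
--         ".sh": "bash",
--         ".yaml": "yaml",
--         ".yml": "yaml",
--         ".json": "json",
--         ".toml": "toml",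
--         ".md": "markdown",
--     }
--     for suffix, lexer in suffix_map.items():
--         if path.endswith(suffix):
--             return lexer
--     return None
-- ===== SOURCE B (Python) =====
-- def _get_lexer_for_path(path: str) -> str | None:
--     """Get pygments lexer name for a file path."""
--     if "." not in path:
--         return None
--     ext = path.rsplit(".", 1)[-1]
--     if ext == "py":
--         return "python"
--     elif ext == "rs":
--         return "rust"
--     elif ext == "js":
--         return "javascript"
--     elif ext == "ts":
--         return "typescript"
--     elif ext == "go":
--         return "go"
--     elif ext == "rb":
--         return "ruby"
--     elif ext == "java":
--         return "java"
--     elif ext == "c":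
--         return "c"
--     elif ext == "cpp":
--         return "cpp"
--     elif ext == "h":
--         return "c"
--     elif ext == "hpp":
--         return "cpp"
--     elif ext == "sh":
--         return "bash"
--     elif ext == "yaml":
--         return "yaml"
--     elif ext == "yml":
--         return "yaml"
--     elif ext == "json":
--         return "json"
--     elif ext == "toml":
--         return "toml"
--     elif ext == "md":
--         return "markdown"
--     return None
-- ===== Notes on version B (the rewrite author's own statement) =====
-- stated objective: idiomatic
-- what changed: B computes the extension after the last dot once (rsplit) and dispatches on it with a direct equality chain, instead of A's loop over a suffix dict calling path.endswith for every key.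
import Mathlib
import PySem

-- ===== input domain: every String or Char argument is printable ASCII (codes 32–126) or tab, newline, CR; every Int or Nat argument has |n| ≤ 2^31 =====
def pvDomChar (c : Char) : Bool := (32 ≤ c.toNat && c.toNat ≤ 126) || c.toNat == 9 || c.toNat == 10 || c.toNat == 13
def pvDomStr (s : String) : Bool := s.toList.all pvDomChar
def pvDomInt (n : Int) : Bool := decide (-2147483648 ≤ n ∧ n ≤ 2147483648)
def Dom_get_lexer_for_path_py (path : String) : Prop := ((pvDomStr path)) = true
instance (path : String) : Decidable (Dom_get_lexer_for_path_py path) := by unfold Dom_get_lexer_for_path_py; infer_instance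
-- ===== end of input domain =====

-- B computes the extension after the last dot once and dispatches on it with a direct
-- equality chain, replacing A's loop over the suffix dict calling endswith (idiomatic).

-- ===== PORT A =====
-- the suffix_map dict literal (keys as List Char = PySem's string carrier)
def pvPairs : List (List Char × String) :=
  [(['.', 'p', 'y'], "python"),
   (['.', 'r', 's'], "rust"),
   (['.', 'j', 's'], "javascript"),
   (['.', 't', 's'], "typescript"),
   (['.', 'g', 'o'], "go"),
   (['.', 'r', 'b'], "ruby"),
   (['.', 'j', 'a', 'v', 'a'], "java"),
   (['.', 'c'], "c"),
   (['.', 'c', 'p', 'p'], "cpp"),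
   (['.', 'h'], "c"),
   (['.', 'h', 'p', 'p'], "cpp"),
   (['.', 's', 'h'], "bash"),
   (['.', 'y', 'a', 'm', 'l'], "yaml"),
   (['.', 'y', 'm', 'l'], "yaml"),
   (['.', 'j', 's', 'o', 'n'], "json"),
   (['.', 't', 'o', 'm', 'l'], "toml"),
   (['.', 'm', 'd'], "markdown")]

-- 'for suffix, lexer in suffix_map.items(): if path.endswith(suffix): return lexer'
def pvLexLoop : List (List Char × String) → List Char → Option String
  | [], _ => none
  | (suffix, lexer) :: rest, l =>
      if PySem.Chars.endswith l suffix then some lexer else pvLexLoop rest l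

def get_lexer_for_path_py (path : String) : Option String :=
  pvLexLoop pvPairs path.toList

-- ===== PORT B =====
-- hand port of path.rsplit('.', 1)[-1]: the segment after the LAST '.'; exact because
-- str.rsplit with maxsplit=1 splits at the last occurrence of the separator.
def pvExt (l : List Char) : List Char := (l.reverse.takeWhile (· != '.')).reverse

-- the if/elif chain of Source B: 'if ext == "py": return "python" elif ... return None'
def pvLexOf (e : List Char) : Option String :=
  if e == ['p', 'y'] then some "python"
  else if e == ['r', 's'] then some "rust"
  else if e == ['j', 's'] then some "javascript"
  else if e == ['t', 's'] then some "typescript"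
  else if e == ['g', 'o'] then some "go"
  else if e == ['r', 'b'] then some "ruby"
  else if e == ['j', 'a', 'v', 'a'] then some "java"
  else if e == ['c'] then some "c"
  else if e == ['c', 'p', 'p'] then some "cpp"
  else if e == ['h'] then some "c"
  else if e == ['h', 'p', 'p'] then some "cpp"
  else if e == ['s', 'h'] then some "bash"
  else if e == ['y', 'a', 'm', 'l'] then some "yaml"
  else if e == ['y', 'm', 'l'] then some "yaml"
  else if e == ['j', 's', 'o', 'n'] then some "json"
  else if e == ['t', 'o', 'm', 'l'] then some "toml"
  else if e == ['m', 'd'] then some "markdown"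
  else none

def get_lexer_for_path_py_alt (path : String) : Option String :=
  if PySem.Chars.isIn ['.'] path.toList then pvLexOf (pvExt path.toList)
  else none

-- ===== PRECONDITION & SPEC =====
def Spec_get_lexer_for_path_py (path : String) (out : Option String) : Prop := out = get_lexer_for_path_py_alt path
instance (path : String) (out : Option String) : Decidable (Spec_get_lexer_for_path_py path out) := by unfold Spec_get_lexer_for_path_py; infer_instance

-- ===== CLAIM (what is proved, stated in full; the proofs are below) =====
def Claim_equal_get_lexer_for_path_py : Prop := ∀ (path : String), Dom_get_lexer_for_path_py path → Spec_get_lexer_for_path_py path (get_lexer_for_path_py path)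

-- ===== LEMMAS AND PROOFS =====

-- splitting off everything after the LAST '.' leaves pvExt
lemma pvExt_append (t s : List Char) (hs : s.all (· != '.') = true) :
    pvExt (t ++ '.' :: s) = s := by
  unfold pvExt
  rw [List.reverse_append, List.reverse_cons, List.append_assoc, List.takeWhile_append]
  have h1 : s.reverse.takeWhile (· != '.') = s.reverse := by
    rw [List.takeWhile_eq_self_iff]
    intro c hc
    exact (List.all_eq_true.mp hs) c (List.mem_reverse.mp hc)
  simp [h1]

-- if l contains a dot, it splits as r ++ '.' :: pvExt l
lemma pvExt_split (l : List Char) (h : '.' ∈ l) : ∃ r, l = r ++ '.' :: pvExt l := by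
  have hd : l.reverse.dropWhile (· != '.') ≠ [] := by
    intro hnil
    have := List.dropWhile_eq_nil_iff.mp hnil '.' (List.mem_reverse.mpr h)
    simp at this
  have hsplit : l.reverse.takeWhile (· != '.') ++ l.reverse.dropWhile (· != '.') = l.reverse :=
    List.takeWhile_append_dropWhile
  rcases hcons : l.reverse.dropWhile (· != '.') with _ | ⟨a, t⟩
  · exact absurd hcons hd
  · have ha : a = '.' := by
      have h1 := List.head_dropWhile_not (· != '.') hd
      have h2 : (l.reverse.dropWhile (· != '.')).head? = some a := by rw [hcons]; rfl
      have h3 := List.head?_eq_some_head (l := l.reverse.dropWhile (· != '.')) hd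
      rw [h2] at h3
      have h4 : (l.reverse.dropWhile (· != '.')).head hd = a := by
        injection h3.symm
      rw [h4] at h1
      simpa using h1
    refine ⟨t.reverse, ?_⟩
    calc l = l.reverse.reverse := (List.reverse_reverse l).symm
      _ = (l.reverse.takeWhile (· != '.') ++ l.reverse.dropWhile (· != '.')).reverse := by
            rw [hsplit]
      _ = _ := by rw [hcons, ha]; simp [pvExt]

lemma pv_endswith_iff (l s : List Char) (hs : s.all (· != '.') = true) :
    (('.' :: s) <:+ l) ↔ ('.' ∈ l ∧ pvExt l = s) := by
  constructor
  · rintro ⟨t, rfl⟩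
    exact ⟨by simp, pvExt_append t s hs⟩
  · rintro ⟨h, rfl⟩
    obtain ⟨r, hr⟩ := pvExt_split l h
    exact ⟨r, hr.symm⟩

lemma pv_endswith_eq (l s : List Char) (h : '.' ∈ l) (hs : s.all (· != '.') = true) :
    PySem.Chars.endswith l ('.' :: s) = (pvExt l == s) := by
  rw [Bool.eq_iff_iff, PySem.Chars.endswith_iff, pv_endswith_iff l s hs, beq_iff_eq]
  constructor
  · rintro ⟨-, rfl⟩; rfl
  · rintro rfl; exact ⟨h, rfl⟩

lemma pv_endswith_false (l s : List Char) (h : '.' ∉ l) :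
    PySem.Chars.endswith l ('.' :: s) = false := by
  cases hE : PySem.Chars.endswith l ('.' :: s)
  · rfl
  · exact absurd (((PySem.Chars.endswith_iff l ('.' :: s)).mp hE).subset (by simp)) h

-- with a dot present, A's endswith loop is exactly B's dispatch on the extension
lemma pv_loop_dot (l : List Char) (h : '.' ∈ l) :
    pvLexLoop pvPairs l = pvLexOf (pvExt l) := by
  show pvLexLoop pvPairs l = pvLexOf (pvExt l)
  simp only [pvPairs, pvLexLoop]
  rw [pv_endswith_eq l ['p', 'y'] h (by decide)]
  rw [pv_endswith_eq l ['r', 's'] h (by decide)]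
  rw [pv_endswith_eq l ['j', 's'] h (by decide)]
  rw [pv_endswith_eq l ['t', 's'] h (by decide)]
  rw [pv_endswith_eq l ['g', 'o'] h (by decide)]
  rw [pv_endswith_eq l ['r', 'b'] h (by decide)]
  rw [pv_endswith_eq l ['j', 'a', 'v', 'a'] h (by decide)]
  rw [pv_endswith_eq l ['c'] h (by decide)]
  rw [pv_endswith_eq l ['c', 'p', 'p'] h (by decide)]
  rw [pv_endswith_eq l ['h'] h (by decide)]
  rw [pv_endswith_eq l ['h', 'p', 'p'] h (by decide)]
  rw [pv_endswith_eq l ['s', 'h'] h (by decide)]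
  rw [pv_endswith_eq l ['y', 'a', 'm', 'l'] h (by decide)]
  rw [pv_endswith_eq l ['y', 'm', 'l'] h (by decide)]
  rw [pv_endswith_eq l ['j', 's', 'o', 'n'] h (by decide)]
  rw [pv_endswith_eq l ['t', 'o', 'm', 'l'] h (by decide)]
  rw [pv_endswith_eq l ['m', 'd'] h (by decide)]
  rfl

lemma pv_main (l : List Char) :
    pvLexLoop pvPairs l =
      (if PySem.Chars.isIn ['.'] l then pvLexOf (pvExt l) else none) := by
  by_cases h : '.' ∈ l
  · have hin : PySem.Chars.isIn ['.'] l = true :=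
      (PySem.Chars.isIn_iff_infix _ _).mpr ((List.singleton_infix_iff _ _).mpr h)
    rw [hin, if_pos rfl]
    exact pv_loop_dot l h
  · have hin : PySem.Chars.isIn ['.'] l = false := by
      cases hI : PySem.Chars.isIn ['.'] l
      · rfl
      · exact absurd ((List.singleton_infix_iff _ _).mp
          ((PySem.Chars.isIn_iff_infix _ _).mp hI)) h
    rw [hin]
    simp only [pvLexLoop, pvPairs, pv_endswith_false l _ h]
    simp

-- ===== VERDICT (by name: the statement is the Claim_ definition above) =====
theorem get_lexer_for_path_py_spec : Claim_equal_get_lexer_for_path_py := by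
  intro path _
  unfold Spec_get_lexer_for_path_py get_lexer_for_path_py get_lexer_for_path_py_alt
  exact pv_main path.toList
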